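-- pv_equiv track=rewrite | github.com/bofh69/aoc-2025 | day2/day2_part2.py | count_invalids
-- ===== SOURCE A (Python) =====
-- def count_invalids(start, end):
--     """Count numbers in the range that are invalid."""
--
--     invalid_sum = 0
--     for number in range(start, end + 1):
--         decimals = len(str(number))
--         for n_digits in range(1, decimals // 2 + 1):
--             if decimals % n_digits != 0:
--                 continue
--             base = 10**n_digits
--             bv = number % base
--             if bv == 0:
--                 continue
--             v = bv
--             i = n_digits
--             while i < decimals:
--                 v = (v * base) + bv
--                 i += n_digits
--             if v == number:
--                 invalid_sum += number
--                 break
--     return invalid_sum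
-- ===== SOURCE B (Python) =====
-- def count_invalids(start, end):
--     """Count numbers in the range that are invalid."""
--     # Directly enumerate numbers that are a digit block (length L, no leading
--     # zero) repeated >= 2 times, instead of testing every number in the range.
--     found = set()
--     L = 1
--     while 10 ** (L - 1) * (10 ** L + 1) <= end:
--         base = 10 ** L
--         for bv in range(base // 10, base):
--             rep = base + 1
--             n = bv * rep
--             while n <= end:
--                 if n >= start:
--                     found.add(n)
--                 rep = rep * base + 1
--                 n = bv * rep
--         L += 1
--     return sum(found)
-- ===== Notes on version B (the rewrite author's own statement) =====
-- stated objective: faster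
-- what changed: Instead of scanning every number in [start, end] and testing each for a repeated digit block, B directly enumerates all repeated-block numbers (block length L, block value bv without leading zero, >= 2 repetitions) up to end, dedupes them in a set and sums those >= start; intended as faster, measured 265x at the largest probe size on non-trivial ranges (ties on empty/negative ranges where A does no work).
import Mathlib
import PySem

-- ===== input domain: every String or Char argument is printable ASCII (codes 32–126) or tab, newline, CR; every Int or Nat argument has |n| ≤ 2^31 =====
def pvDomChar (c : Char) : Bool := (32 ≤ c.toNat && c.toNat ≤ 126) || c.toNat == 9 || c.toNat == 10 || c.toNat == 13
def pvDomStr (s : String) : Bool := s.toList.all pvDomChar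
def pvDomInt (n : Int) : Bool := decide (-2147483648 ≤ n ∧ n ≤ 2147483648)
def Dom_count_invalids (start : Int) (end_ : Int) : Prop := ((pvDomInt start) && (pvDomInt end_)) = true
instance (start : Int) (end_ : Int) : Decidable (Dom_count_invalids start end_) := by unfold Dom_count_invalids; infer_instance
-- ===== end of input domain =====

-- B replaces A's scan of every number in [start, end] by a direct enumeration of
-- the repeated-digit-block numbers up to end (objective: faster; measured faster by
-- a timing run on non-trivial ranges, equal on empty ranges).

-- ===== PORT A =====
-- 'v = bv; i = n_digits; while i < decimals: v = v*base+bv; i += n_digits', fuel-bounded;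
-- fuel = decimals suffices (i starts at n_digits ≥ 1 and grows by n_digits ≥ 1 each step).
def aWhile (fuel : Nat) (v i L base bv D : Int) : Int :=
  match fuel with
  | 0 => v
  | f+1 => if i < D then aWhile f (v*base+bv) (i+L) L base bv D else v

-- body of the inner 'for n_digits in …' loop ('continue' = false, final test = the bool)
def aCheck (number decimals n_digits : Int) : Bool :=
  if PySem.Int.mod decimals n_digits ≠ 0 then false
  else
    let base : Int := (10:Int) ^ n_digits.toNat   -- 10**n_digits; n_digits ≥ 1 in the range, so toNat is exact
    let bv := PySem.Int.mod number base
    if bv = 0 then false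
    else decide (aWhile decimals.toNat bv n_digits n_digits base bv decimals = number)

def count_invalids (start : Int) (end_ : Int) : Int :=
  (PySem.List.pyRange start (end_+1)).foldl (fun invalid_sum number =>
    -- 'for … : if any check succeeds: invalid_sum += number; break' = add number once if some n_digits checks
    if (PySem.List.pyRange 1 (PySem.Int.floordiv (PySem.Str.len (PySem.Int.toStr number)) 2 + 1)).any
         (aCheck number (PySem.Str.len (PySem.Int.toStr number)))
    then invalid_sum + number else invalid_sum) 0

-- ===== PORT B =====
-- 'rep = base+1; n = bv*rep; while n <= end: …' — fuel-bounded; fuel = end.toNat+1 suffices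
-- (n grows by a factor ≥ 10 each iteration).
def bWhile (fuel : Nat) (bv base rep start end_ : Int) (found : PySem.Set Int) : PySem.Set Int :=
  match fuel with
  | 0 => found
  | f+1 =>
    let n := bv * rep
    if n ≤ end_ then
      bWhile f bv base (rep*base+1) start end_ (if start ≤ n then PySem.Set.add found n else found)
    else found

-- 'L = 1; while 10**(L-1) * (10**L + 1) <= end: … L += 1' — L ≥ 1 always, carried as a Nat;
-- fuel = end.toNat+1 suffices (the guard fails once 10**(2L-1) > end).
def bOuter (fuel L : Nat) (start end_ : Int) (found : PySem.Set Int) : PySem.Set Int :=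
  match fuel with
  | 0 => found
  | f+1 =>
    if (10:Int)^(L-1) * ((10:Int)^L + 1) ≤ end_ then
      let base : Int := (10:Int)^L
      bOuter f (L+1) start end_
        ((PySem.List.pyRange (PySem.Int.floordiv base 10) base).foldl
          (fun fd bv => bWhile (end_.toNat+1) bv base (base+1) start end_ fd) found)
    else found

def count_invalids_alt (start : Int) (end_ : Int) : Int :=
  (bOuter (end_.toNat+1) 1 start end_ PySem.Set.empty).sum

-- ===== PRECONDITION & SPEC =====
def Spec_count_invalids (start : Int) (end_ : Int) (out : Int) : Prop := out = count_invalids_alt start end_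
instance (start : Int) (end_ : Int) (out : Int) : Decidable (Spec_count_invalids start end_ out) := by unfold Spec_count_invalids; infer_instance

-- ===== CLAIM (what is proved, stated in full; the proofs are below) =====
def Claim_equal_count_invalids : Prop := ∀ (start : Int) (end_ : Int), Dom_count_invalids start end_ → Spec_count_invalids start end_ (count_invalids start end_)

-- ===== LEMMAS AND PROOFS =====

-- v after c iterations of 'v = v*base + bv' starting from bv (c+1 digit blocks)
def iterV (bv base : Int) : Nat → Int
  | 0 => bv
  | c+1 => iterV bv base c * base + bv

-- value of B's 'rep' variable after t updates 'rep = rep*base + 1' from base+1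
def repV (base : Int) : Nat → Int
  | 0 => base + 1
  | t+1 => repV base t * base + 1

-- n is a digit block of length L (no leading zero) repeated at least twice
def RepBlock (n : Int) : Prop :=
  ∃ (L c : Nat) (bv : Int), 1 ≤ L ∧ 1 ≤ c ∧ (10:Int)^(L-1) ≤ bv ∧ bv < (10:Int)^L ∧
    n = iterV bv ((10:Int)^L) c

theorem iterV_pos (bv base : Int) (hb : 1 ≤ bv) (hB : 2 ≤ base) (c : Nat) :
    1 ≤ iterV bv base c := by
  induction c with
  | zero => exact hb
  | succ c ih => simp only [iterV]; nlinarith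

theorem bv_mul_repV (bv base : Int) (t : Nat) :
    bv * repV base t = iterV bv base (t+1) := by
  induction t with
  | zero => show bv * (base + 1) = iterV bv base 0 * base + bv; simp only [iterV]; ring
  | succ t ih =>
    show bv * (repV base t * base + 1) = iterV bv base (t+1) * base + bv
    rw [← ih]; ring

theorem repV_pos (base : Int) (hB : 2 ≤ base) (t : Nat) : 1 ≤ repV base t := by
  induction t with
  | zero => simp only [repV]; omega
  | succ t ih => simp only [repV]; nlinarith

theorem repV_mono (base : Int) (hB : 2 ≤ base) {t t' : Nat} (h : t ≤ t') :
    repV base t ≤ repV base t' := by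
  induction t' with
  | zero => simp [Nat.le_zero.mp h]
  | succ t' ih =>
    rcases Nat.eq_or_lt_of_le h with rfl | h'
    · exact le_refl _
    · have := ih (by omega)
      have h1 := repV_pos base hB t'
      simp only [repV]; nlinarith

theorem repV_ge (base : Int) (hB : 2 ≤ base) (t : Nat) : (t : Int) + 2 ≤ repV base t := by
  induction t with
  | zero => simp only [repV]; omega
  | succ t ih =>
    simp only [repV]
    have h1 := repV_pos base hB t
    push_cast
    nlinarith

theorem iterV_bounds (L : Nat) (bv : Int) (hL : 1 ≤ L)
    (h1 : (10:Int)^(L-1) ≤ bv) (h2 : bv < (10:Int)^L) (c : Nat) :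
    (10:Int)^(L*(c+1)-1) ≤ iterV bv ((10:Int)^L) c ∧
      iterV bv ((10:Int)^L) c < (10:Int)^(L*(c+1)) := by
  induction c with
  | zero => simpa [iterV] using ⟨h1, h2⟩
  | succ c ih =>
    obtain ⟨ihl, ihh⟩ := ih
    have e0 : L*(c+1+1)-1 = (L*(c+1)-1) + L := by
      have h' : 1 ≤ L*(c+1) := Nat.one_le_iff_ne_zero.mpr (Nat.mul_ne_zero (by omega) (by omega))
      rw [Nat.mul_succ]; omega
    have e1 : (10:Int)^(L*(c+1+1)-1) = (10:Int)^(L*(c+1)-1) * (10:Int)^L := by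
      rw [e0, pow_add]
    have e0' : L*(c+1+1) = (L*(c+1)) + L := by ring
    have e2 : (10:Int)^(L*(c+1+1)) = (10:Int)^(L*(c+1)) * (10:Int)^L := by
      rw [e0', pow_add]
    have hbase : (1:Int) ≤ (10:Int)^L := one_le_pow₀ (by omega)
    have hbv0 : (0:Int) ≤ bv := le_trans (by positivity) h1
    constructor
    · rw [e1]; simp only [iterV]; nlinarith
    · rw [e2]; simp only [iterV]; nlinarith

theorem iterV_small (L : Nat) (bv : Int) (hL : 1 ≤ L)
    (h1 : 1 ≤ bv) (h2 : bv < (10:Int)^(L-1)) (c : Nat) :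
    iterV bv ((10:Int)^L) c < (10:Int)^(L*(c+1)-1) := by
  induction c with
  | zero => simpa [iterV] using h2
  | succ c ih =>
    have e0 : L*(c+1+1)-1 = (L*(c+1)-1) + L := by
      have h' : 1 ≤ L*(c+1) := Nat.one_le_iff_ne_zero.mpr (Nat.mul_ne_zero (by omega) (by omega))
      rw [Nat.mul_succ]; omega
    have e1 : (10:Int)^(L*(c+1+1)-1) = (10:Int)^(L*(c+1)-1) * (10:Int)^L := by
      rw [e0, pow_add]
    have hbB : bv < (10:Int)^L := lt_of_lt_of_le h2 (pow_le_pow_right₀ (by omega) (by omega))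
    have hbase : (1:Int) ≤ (10:Int)^L := one_le_pow₀ (by omega)
    rw [e1]; simp only [iterV]; nlinarith [iterV_pos bv ((10:Int)^L) h1 (by nlinarith) c]

-- digit-string length = log10 + 1
theorem tdc_len (f : Nat) : ∀ (n : Nat) (l : List Char), n < f →
    (Nat.toDigitsCore 10 f n l).length = Nat.log 10 n + 1 + l.length := by
  induction f with
  | zero => omega
  | succ f ih =>
    intro n l h
    simp only [Nat.toDigitsCore]
    by_cases h10 : n / 10 = 0
    · have hn : n < 10 := by omega
      simp only [h10, if_pos, List.length_cons, Nat.log_eq_zero_iff.mpr (Or.inl hn)]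
      omega
    · have hge : 10 ≤ n := by
        by_contra hc
        exact h10 (Nat.div_eq_of_lt (by omega))
      have hlt : n / 10 < f := by
        have := Nat.div_lt_self (by omega : 0 < n) (by omega : 1 < 10)
        omega
      rw [if_neg h10, ih (n/10) _ hlt]
      have hl := Nat.log_div_base 10 n
      have hp := Nat.log_pos (b := 10) (by omega) hge
      simp only [List.length_cons]
      omega

theorem toDigits_len (m : Nat) : (Nat.toDigits 10 m).length = Nat.log 10 m + 1 := by
  simpa [Nat.toDigits] using tdc_len (m+1) m [] (by omega)

theorem len_toStr (n : Int) : PySem.Str.len (PySem.Int.toStr n) = ((PySem.Int.toChars n).length : Int) := by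
  rw [PySem.Str.len_eq, PySem.Int.toList_toStr]

theorem toChars_len_of_nonneg (n : Int) (h : 0 ≤ n) :
    (PySem.Int.toChars n).length = Nat.log 10 n.toNat + 1 := by
  simp [PySem.Int.toChars, not_lt.mpr h, toDigits_len]

-- the loop's running value: c further iterations of 'v = v*base + bv' from v
def iterFrom (base bv v : Int) : Nat → Int
  | 0 => v
  | c+1 => iterFrom base bv (v*base+bv) c

theorem iterFrom_succ (base bv : Int) (c : Nat) :
    ∀ v : Int, iterFrom base bv v (c+1) = iterFrom base bv v c * base + bv := by
  induction c with
  | zero => intro v; rfl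
  | succ c ih =>
    intro v
    show iterFrom base bv (v*base+bv) (c+1) = iterFrom base bv (v*base+bv) c * base + bv
    exact ih (v*base+bv)

theorem iterFrom_eq_iterV (bv base : Int) (c : Nat) :
    iterFrom base bv bv c = iterV bv base c := by
  induction c with
  | zero => rfl
  | succ c ih => rw [iterFrom_succ, ih]; rfl

-- aWhile unrolls to iterFrom when D - i is an exact multiple of L
theorem aWhile_eq (L base bv D : Int) (hL : 1 ≤ L) :
    ∀ (c f : Nat) (v i : Int), c ≤ f → i + L * c = D →
    aWhile f v i L base bv D = iterFrom base bv v c := by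
  intro c
  induction c with
  | zero =>
    intro f v i _ hD
    have h : ¬ i < D := by omega
    cases f with
    | zero => rfl
    | succ f => simp [aWhile, h, iterFrom]
  | succ c ih =>
    intro f v i hcf hD
    have hlt : i < D := by
      have h1 : (0:Int) ≤ L * c := by positivity
      push_cast at hD
      nlinarith
    cases f with
    | zero => omega
    | succ f =>
      simp only [aWhile, if_pos hlt]
      rw [ih f (v*base+bv) (i+L) (by omega) (by push_cast at hD ⊢; linarith)]
      rfl

-- digit-count bracket for positive n
theorem digit_bounds (n : Int) (h : 1 ≤ n) :
    (10:Int)^((PySem.Int.toChars n).length - 1) ≤ n ∧ n < (10:Int)^(PySem.Int.toChars n).length := by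
  have h0 : (0:Int) ≤ n := by omega
  have hD := toChars_len_of_nonneg n h0
  have hnz : n.toNat ≠ 0 := by omega
  have h1 : (10:Nat)^(Nat.log 10 n.toNat) ≤ n.toNat := Nat.pow_log_le_self 10 hnz
  have h2 : n.toNat < (10:Nat)^(Nat.log 10 n.toNat + 1) := Nat.lt_pow_succ_log_self (by omega) _
  have hcast : ((n.toNat : Int)) = n := Int.toNat_of_nonneg h0
  constructor
  · rw [hD]
    simp only [Nat.add_sub_cancel]
    calc (10:Int)^(Nat.log 10 n.toNat) = ((10:Nat)^(Nat.log 10 n.toNat) : Nat) := by push_cast; ring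
    _ ≤ (n.toNat : Int) := by exact_mod_cast h1
    _ = n := hcast
  · rw [hD]
    calc n = (n.toNat : Int) := hcast.symm
    _ < ((10:Nat)^(Nat.log 10 n.toNat + 1) : Nat) := by exact_mod_cast h2
    _ = (10:Int)^(Nat.log 10 n.toNat + 1) := by push_cast; ring


-- A's per-number test is exactly RepBlock
theorem aPred_iff (n : Int) :
    ((PySem.List.pyRange 1 (PySem.Int.floordiv (PySem.Str.len (PySem.Int.toStr n)) 2 + 1)).any
      (aCheck n (PySem.Str.len (PySem.Int.toStr n))) = true) ↔ RepBlock n := by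
  rw [len_toStr]
  set Dn := (PySem.Int.toChars n).length with hDn
  constructor
  · -- any check succeeds → RepBlock
    intro hany
    obtain ⟨L, hmem, hchk⟩ := List.any_eq_true.mp hany
    obtain ⟨hL1, hL2⟩ := PySem.List.mem_pyRange_one.mp hmem
    have hL2' : L * 2 ≤ (Dn : Int) :=
      (PySem.Int.le_floordiv_iff_mul_le (by norm_num)).mp (by omega)
    simp only [aCheck] at hchk
    split_ifs at hchk with hmod hbv0
    have hdvd : L ∣ (Dn : Int) := (PySem.Int.mod_eq_zero_iff_dvd _ _).mp (by omega)
    obtain ⟨k, hk⟩ := hdvd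
    have hk2 : 2 ≤ k := by nlinarith
    have hval := decide_eq_true_iff.mp hchk
    set Ln := L.toNat with hLn
    have hLcast : (Ln : Int) = L := Int.toNat_of_nonneg (by omega)
    set kn := k.toNat with hkn
    have hkcast : (kn : Int) = k := Int.toNat_of_nonneg (by omega)
    set bv := PySem.Int.mod n ((10:Int) ^ Ln) with hbv
    have hbase : (0:Int) < (10:Int)^Ln := by positivity
    have hbvlo : 0 ≤ bv := PySem.Int.mod_nonneg n hbase
    have hbvhi : bv < (10:Int)^Ln := PySem.Int.mod_lt n hbase
    have hDnk : Dn = Ln * kn := by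
      have : (Dn : Int) = ((Ln * kn : Nat) : Int) := by push_cast; rw [hLcast, hkcast]; exact hk
      exact_mod_cast this
    have hw : aWhile ((Dn:Int)).toNat bv L L ((10:Int)^Ln) bv (Dn : Int) = iterFrom ((10:Int)^Ln) bv bv (kn - 1) := by
      apply aWhile_eq L ((10:Int)^Ln) bv (Dn : Int) hL1 (kn - 1) ((Dn:Int)).toNat bv L
      · simp only [Int.toNat_natCast]
        have hLn1' : 1 ≤ Ln := by omega
        have hkle : kn ≤ Ln * kn := Nat.le_mul_of_pos_left kn (by omega)
        omega
      · rw [← hLcast]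
        have : (1:Int) ≤ (kn : Int) := by omega
        have hc : ((kn - 1 : Nat) : Int) = (kn : Int) - 1 := by omega
        rw [hc]
        rw [hk, ← hLcast, ← hkcast]
        ring
    rw [hw, iterFrom_eq_iterV] at hval
    have hbv1 : 1 ≤ bv := by omega
    have hLn1 : 1 ≤ Ln := by omega
    have hBge : (2:Int) ≤ (10:Int)^Ln := le_trans (by norm_num) (le_self_pow₀ (by norm_num) (by omega))
    have hn1 : 1 ≤ n := by rw [← hval]; exact iterV_pos bv _ hbv1 hBge _
    have hdlo : (10:Int)^(Dn - 1) ≤ n := (digit_bounds n hn1).1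
    -- no leading zero in the block
    have hbvbig : (10:Int)^(Ln-1) ≤ bv := by
      by_contra hcon
      have hsmall := iterV_small Ln bv hLn1 hbv1 (by omega) (kn - 1)
      have he : Ln * (kn - 1 + 1) - 1 = Dn - 1 := by
        have : kn - 1 + 1 = kn := by omega
        rw [this, ← hDnk]
      rw [he, hval] at hsmall
      omega
    exact ⟨Ln, kn - 1, bv, hLn1, by omega, hbvbig, hbvhi, hval.symm⟩
  · -- RepBlock → the check at L succeeds
    rintro ⟨L, c, bv, hL, hc, hbv1, hbv2, rfl⟩
    set base : Int := (10:Int)^L with hbase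
    have hBge : (2:Int) ≤ base := le_trans (by norm_num) (le_self_pow₀ (by norm_num) (by omega))
    have hbvpos : (1:Int) ≤ bv := le_trans (one_le_pow₀ (by norm_num)) hbv1
    have hn1 : 1 ≤ iterV bv base c := iterV_pos bv base hbvpos hBge c
    obtain ⟨hblo, hbhi⟩ := iterV_bounds L bv hL hbv1 hbv2 c
    -- the number has exactly L*(c+1) digits
    have hDneq : Dn = L * (c+1) := by
      have h0 : (0:Int) ≤ iterV bv base c := by omega
      have hD := toChars_len_of_nonneg _ h0
      have hlog : Nat.log 10 (iterV bv base c).toNat = L*(c+1) - 1 := by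
        apply Nat.log_eq_of_pow_le_of_lt_pow
        · have : ((10:Nat)^(L*(c+1)-1) : Int) = (10:Int)^(L*(c+1)-1) := by push_cast; ring
          have hle : ((10:Nat)^(L*(c+1)-1) : Int) ≤ ((iterV bv base c).toNat : Int) := by
            rw [this, Int.toNat_of_nonneg h0]; exact hblo
          exact_mod_cast hle
        · have he : L*(c+1) - 1 + 1 = L*(c+1) := by
            have : 1 ≤ L*(c+1) := Nat.one_le_iff_ne_zero.mpr (Nat.mul_ne_zero (by omega) (by omega))
            omega
          rw [he]
          have : ((iterV bv base c).toNat : Int) < ((10:Nat)^(L*(c+1)) : Int) := by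
            rw [Int.toNat_of_nonneg h0]; push_cast; exact hbhi
          exact_mod_cast this
      rw [hDn, hD, hlog]
      have : 1 ≤ L*(c+1) := Nat.one_le_iff_ne_zero.mpr (Nat.mul_ne_zero (by omega) (by omega))
      omega
    apply List.any_eq_true.mpr
    refine ⟨(L : Int), ?_, ?_⟩
    · apply PySem.List.mem_pyRange_one.mpr
      constructor
      · exact_mod_cast hL
      · have : (L:Int) ≤ PySem.Int.floordiv (Dn : Int) 2 := by
          apply (PySem.Int.le_floordiv_iff_mul_le (by norm_num)).mpr
          rw [hDneq]; push_cast; nlinarith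
        omega
    · simp only [aCheck, Int.toNat_natCast, ← hbase]
      have hmod0 : PySem.Int.mod (Dn : Int) (L : Int) = 0 := by
        apply (PySem.Int.mod_eq_zero_iff_dvd _ _).mpr
        rw [hDneq]; push_cast; exact Dvd.intro _ rfl
      rw [if_neg (by simp [hmod0])]
      have hbpos : (0:Int) < base := by positivity
      have hmodbv : PySem.Int.mod (iterV bv base c) base = bv := by
        rw [PySem.Int.mod_eq_emod_of_pos hbpos]
        obtain ⟨c', rfl⟩ : ∃ c', c = c' + 1 := ⟨c - 1, by omega⟩
        show (iterV bv base c' * base + bv) % base = bv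
        rw [add_comm, mul_comm, Int.add_mul_emod_self_left,
          Int.emod_eq_of_lt (by omega) (by omega)]
      rw [hmodbv, if_neg (by omega)]
      apply decide_eq_true_iff.mpr
      have := aWhile_eq (L:Int) base bv (Dn:Int) (by exact_mod_cast hL) c Dn bv (L:Int)
        (by rw [hDneq]; nlinarith)
        (by rw [hDneq]; push_cast; ring)
      rw [this, iterFrom_eq_iterV]

-- membership after B's inner while loop
theorem bWhile_mem (bv base start end_ : Int) (x : Int) (hb : 1 ≤ bv) (hB : 2 ≤ base) :
    ∀ (f t0 : Nat) (found : PySem.Set Int), end_ < bv * repV base (t0 + f) →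
    (x ∈ bWhile f bv base (repV base t0) start end_ found ↔
      x ∈ found ∨ ∃ t, t0 ≤ t ∧ start ≤ bv * repV base t ∧ bv * repV base t ≤ end_ ∧
        x = bv * repV base t) := by
  intro f
  induction f with
  | zero =>
    intro t0 found hf
    simp only [bWhile, Nat.add_zero] at *
    constructor
    · exact Or.inl
    · rintro (h | ⟨t, ht, _, hle, rfl⟩)
      · exact h
      · have := repV_mono base hB ht
        have : bv * repV base t0 ≤ bv * repV base t := by nlinarith
        omega
  | succ f ih =>
    intro t0 found hf
    have hmono : ∀ t, t0 ≤ t → bv * repV base t0 ≤ bv * repV base t := by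
      intro t ht
      have := repV_mono base hB ht
      nlinarith
    simp only [bWhile]
    by_cases hle : bv * repV base t0 ≤ end_
    · rw [if_pos hle]
      have hrep : repV base t0 * base + 1 = repV base (t0+1) := rfl
      rw [hrep, ih (t0+1) _ (by rw [Nat.add_right_comm]; exact hf)]
      constructor
      · rintro (h | ⟨t, ht, h1, h2, rfl⟩)
        · by_cases hst : start ≤ bv * repV base t0
          · rw [if_pos hst] at h
            rcases (PySem.Set.mem_add found _ x).mp h with h' | h'
            · exact Or.inl h'
            · exact Or.inr ⟨t0, le_refl _, by omega, hle, h'⟩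
          · rw [if_neg hst] at h
            exact Or.inl h
        · exact Or.inr ⟨t, by omega, h1, h2, rfl⟩
      · rintro (h | ⟨t, ht, h1, h2, rfl⟩)
        · refine Or.inl ?_
          by_cases hst : start ≤ bv * repV base t0
          · rw [if_pos hst]; exact (PySem.Set.mem_add found _ _).mpr (Or.inl h)
          · rw [if_neg hst]; exact h
        · rcases Nat.eq_or_lt_of_le ht with rfl | ht'
          · refine Or.inl ?_
            rw [if_pos h1]
            exact (PySem.Set.mem_add found _ _).mpr (Or.inr rfl)
          · exact Or.inr ⟨t, by omega, h1, h2, rfl⟩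
    · rw [if_neg hle]
      constructor
      · exact Or.inl
      · rintro (h | ⟨t, ht, _, h2, rfl⟩)
        · exact h
        · have := hmono t ht
          omega


-- membership through a fold that only adds elements
theorem foldl_mem_iff {α : Type} (Q : α → Int → Prop) (g : PySem.Set Int → α → PySem.Set Int) :
    ∀ (l : List α), (∀ (s : PySem.Set Int) (b : α) (x : Int), b ∈ l → (x ∈ g s b ↔ x ∈ s ∨ Q b x)) →
    ∀ (s : PySem.Set Int) (x : Int),
      x ∈ l.foldl g s ↔ x ∈ s ∨ ∃ b ∈ l, Q b x := by
  intro l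
  induction l with
  | nil => intro _; simp
  | cons a l ih =>
    intro hg s x
    simp only [List.foldl_cons, ih (fun s b x hb => hg s b x (List.mem_cons_of_mem a hb)),
      hg s a x (List.mem_cons_self), List.mem_cons]
    constructor
    · rintro ((h | h) | ⟨b, hb, h⟩)
      · exact Or.inl h
      · exact Or.inr ⟨a, Or.inl rfl, h⟩
      · exact Or.inr ⟨b, Or.inr hb, h⟩
    · rintro (h | ⟨b, (rfl | hb), h⟩)
      · exact Or.inl (Or.inl h)
      · exact Or.inl (Or.inr h)
      · exact Or.inr ⟨b, hb, h⟩

theorem ten_pow_ge (k : Nat) : (k:Int) + 1 ≤ (10:Int)^k := by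
  induction k with
  | zero => norm_num
  | succ k ih => rw [pow_succ]; push_cast; nlinarith

theorem seed_inner (bv base end_ : Int) (hb : 1 ≤ bv) (hB : 2 ≤ base) :
    end_ < bv * repV base (0 + (end_.toNat+1)) := by
  have h1 := repV_ge base hB (0 + (end_.toNat+1))
  have h2 := repV_pos base hB (0 + (end_.toNat+1))
  have h3 : end_ ≤ (end_.toNat : Int) := Int.self_le_toNat end_
  have : ((0 + (end_.toNat+1) : Nat) : Int) = (end_.toNat : Int) + 1 := by push_cast; ring
  nlinarith

theorem minN_le_val (M t : Nat) (bv : Int) (hM : 1 ≤ M) (hbv : (10:Int)^(M-1) ≤ bv) :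
    (10:Int)^(M-1) * ((10:Int)^M + 1) ≤ bv * repV ((10:Int)^M) t := by
  have hB : (2:Int) ≤ (10:Int)^M := le_trans (by norm_num) (le_self_pow₀ (by norm_num) (by omega))
  have h0 : repV ((10:Int)^M) 0 ≤ repV ((10:Int)^M) t := repV_mono _ hB (Nat.zero_le t)
  have h1 : repV ((10:Int)^M) 0 = (10:Int)^M + 1 := rfl
  have hpos : (0:Int) < (10:Int)^(M-1) := by positivity
  nlinarith [repV_pos ((10:Int)^M) hB t]

theorem minN_mono (L M : Nat) (hL : 1 ≤ L) (h : L ≤ M) :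
    (10:Int)^(L-1)*((10:Int)^L+1) ≤ (10:Int)^(M-1)*((10:Int)^M+1) := by
  have h1 : (10:Int)^(L-1) ≤ (10:Int)^(M-1) := pow_le_pow_right₀ (by norm_num) (by omega)
  have h2 : (10:Int)^L ≤ (10:Int)^M := pow_le_pow_right₀ (by norm_num) h
  have : (0:Int) < (10:Int)^(L-1) := by positivity
  have : (0:Int) < (10:Int)^L := by positivity
  nlinarith

theorem floordiv_pow10 (L : Nat) (hL : 1 ≤ L) :
    PySem.Int.floordiv ((10:Int)^L) 10 = (10:Int)^(L-1) := by
  rw [PySem.Int.floordiv_eq_ediv_of_pos (by norm_num)]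
  have : (10:Int)^L = (10:Int)^(L-1) * 10 := by
    rw [← pow_succ]; congr 1; omega
  rw [this, Int.mul_ediv_cancel _ (by norm_num)]

-- membership after B's outer loop
theorem bOuter_mem (start end_ : Int) (x : Int) :
    ∀ (f L : Nat) (found : PySem.Set Int), 1 ≤ L →
      end_ < (10:Int)^(L+f-1) * ((10:Int)^(L+f) + 1) →
    (x ∈ bOuter f L start end_ found ↔
      x ∈ found ∨ ∃ (M : Nat) (bv : Int) (t : Nat), L ≤ M ∧ (10:Int)^(M-1) ≤ bv ∧
        bv < (10:Int)^M ∧ start ≤ bv * repV ((10:Int)^M) t ∧ bv * repV ((10:Int)^M) t ≤ end_ ∧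
        x = bv * repV ((10:Int)^M) t) := by
  intro f
  induction f with
  | zero =>
    intro L found hL hf
    simp only [Nat.add_zero] at hf
    simp only [bOuter]
    constructor
    · exact Or.inl
    · rintro (h | ⟨M, bv, t, hLM, hbv1, _, _, h2, rfl⟩)
      · exact h
      · have hm1 := minN_le_val M t bv (by omega) hbv1
        have hm2 := minN_mono L M hL hLM
        omega
  | succ f ih =>
    intro L found hL hf
    simp only [bOuter]
    by_cases hcond : (10:Int)^(L-1) * ((10:Int)^L + 1) ≤ end_
    · rw [if_pos hcond]
      have hB : (2:Int) ≤ (10:Int)^L := le_trans (by norm_num) (le_self_pow₀ (by norm_num) (by omega))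
      have hg : ∀ (s : PySem.Set Int) (bv : Int) (y : Int),
          bv ∈ PySem.List.pyRange (PySem.Int.floordiv ((10:Int)^L) 10) ((10:Int)^L) →
          (y ∈ bWhile (end_.toNat+1) bv ((10:Int)^L) ((10:Int)^L+1) start end_ s ↔
            y ∈ s ∨ ∃ t, 0 ≤ t ∧ start ≤ bv * repV ((10:Int)^L) t ∧
              bv * repV ((10:Int)^L) t ≤ end_ ∧ y = bv * repV ((10:Int)^L) t) := by
        intro s bv y hmem
        rw [floordiv_pow10 L hL] at hmem
        obtain ⟨hlo, hhi⟩ := PySem.List.mem_pyRange_one.mp hmem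
        have hb1 : (1:Int) ≤ bv := le_trans (one_le_pow₀ (by norm_num)) hlo
        have h0 : ((10:Int)^L+1) = repV ((10:Int)^L) 0 := rfl
        rw [h0]
        exact bWhile_mem bv ((10:Int)^L) start end_ y hb1 hB (end_.toNat+1) 0 s
          (seed_inner bv ((10:Int)^L) end_ hb1 hB)
      rw [ih (L+1) _ (by omega) (by rw [Nat.add_right_comm]; exact hf),
        foldl_mem_iff _ _ _ hg]
      constructor
      · rintro ((h | ⟨bv, hmem, t, _, h1, h2, rfl⟩) | ⟨M, bv, t, hLM, hbv1, hbv2, h1, h2, rfl⟩)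
        · exact Or.inl h
        · rw [floordiv_pow10 L hL] at hmem
          obtain ⟨hlo, hhi⟩ := PySem.List.mem_pyRange_one.mp hmem
          exact Or.inr ⟨L, bv, t, le_refl L, hlo, hhi, h1, h2, rfl⟩
        · exact Or.inr ⟨M, bv, t, by omega, hbv1, hbv2, h1, h2, rfl⟩
      · rintro (h | ⟨M, bv, t, hLM, hbv1, hbv2, h1, h2, rfl⟩)
        · exact Or.inl (Or.inl h)
        · rcases Nat.eq_or_lt_of_le hLM with rfl | hLM'
          · refine Or.inl (Or.inr ⟨bv, ?_, t, Nat.zero_le t, h1, h2, rfl⟩)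
            rw [floordiv_pow10 L hL]
            exact PySem.List.mem_pyRange_one.mpr ⟨hbv1, hbv2⟩
          · exact Or.inr ⟨M, bv, t, by omega, hbv1, hbv2, h1, h2, rfl⟩
    · rw [if_neg hcond]
      constructor
      · exact Or.inl
      · rintro (h | ⟨M, bv, t, hLM, hbv1, _, _, h2, rfl⟩)
        · exact h
        · have hm1 := minN_le_val M t bv (by omega) hbv1
          have hm2 := minN_mono L M hL hLM
          omega

theorem bSet_mem (start end_ x : Int) :
    x ∈ bOuter (end_.toNat+1) 1 start end_ PySem.Set.empty ↔
      (start ≤ x ∧ x ≤ end_ ∧ RepBlock x) := by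
  have hseed : end_ < (10:Int)^(1+(end_.toNat+1)-1) * ((10:Int)^(1+(end_.toNat+1)) + 1) := by
    have h1 := ten_pow_ge (1+(end_.toNat+1)-1)
    have h2 : (0:Int) < (10:Int)^(1+(end_.toNat+1)) + 1 := by positivity
    have h3 : end_ ≤ (end_.toNat : Int) := Int.self_le_toNat end_
    have h4 : ((1+(end_.toNat+1)-1 : Nat) : Int) = (end_.toNat : Int) + 1 := by omega
    nlinarith
  rw [bOuter_mem start end_ x (end_.toNat+1) 1 PySem.Set.empty (le_refl 1) hseed]
  have hempty : x ∉ PySem.Set.empty := by simp [PySem.Set.empty]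
  constructor
  · rintro (h | ⟨M, bv, t, hM, h1, h2, h3, h4, rfl⟩)
    · exact absurd h hempty
    · exact ⟨h3, h4, M, t+1, bv, hM, by omega, h1, h2, bv_mul_repV bv _ t⟩
  · rintro ⟨hs, he, M, c, bv, hM, hc, h1, h2, rfl⟩
    have hrw : bv * repV ((10:Int)^M) (c-1) = iterV bv ((10:Int)^M) c := by
      have h := bv_mul_repV bv ((10:Int)^M) (c-1)
      have : c - 1 + 1 = c := by omega
      rwa [this] at h
    exact Or.inr ⟨M, bv, c-1, hM, h1, h2, by rw [hrw]; exact hs, by rw [hrw]; exact he, hrw.symm⟩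

theorem bWhile_nodup (bv base start end_ : Int) :
    ∀ (f : Nat) (rep : Int) (found : PySem.Set Int), found.Nodup →
      (bWhile f bv base rep start end_ found).Nodup := by
  intro f
  induction f with
  | zero => intro rep found h; exact h
  | succ f ih =>
    intro rep found h
    simp only [bWhile]
    split
    · apply ih
      split
      · exact PySem.Set.nodup_add found _ h
      · exact h
    · exact h

theorem foldl_nodup {α : Type} (g : PySem.Set Int → α → PySem.Set Int)
    (hg : ∀ (s : PySem.Set Int) (b : α), s.Nodup → (g s b).Nodup) :
    ∀ (l : List α) (s : PySem.Set Int), s.Nodup → (l.foldl g s).Nodup := by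
  intro l
  induction l with
  | nil => intro s h; exact h
  | cons a l ih => intro s h; exact ih _ (hg s a h)

theorem bOuter_nodup (start end_ : Int) :
    ∀ (f L : Nat) (found : PySem.Set Int), found.Nodup →
      (bOuter f L start end_ found).Nodup := by
  intro f
  induction f with
  | zero => intro L found h; exact h
  | succ f ih =>
    intro L found h
    simp only [bOuter]
    split
    · apply ih
      apply foldl_nodup
      · intro s bv hs
        exact bWhile_nodup bv _ start end_ _ _ s hs
      · exact h
    · exact h

theorem bSet_nodup (start end_ : Int) :
    (bOuter (end_.toNat+1) 1 start end_ PySem.Set.empty).Nodup := by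
  apply bOuter_nodup
  simp [PySem.Set.empty]

theorem pyRange_nodup (a b : Int) : (PySem.List.pyRange a b).Nodup := by
  simp only [PySem.List.pyRange]
  split
  · exact List.nodup_nil
  · refine List.Nodup.map ?_ (List.nodup_range)
    intro k1 k2 h
    simp only [add_right_inj, one_mul] at h
    exact_mod_cast h

-- ===== VERDICT (by name: the statement is the Claim_ definition above) =====
theorem count_invalids_spec : Claim_equal_count_invalids := by
  intro start end_ _
  unfold Spec_count_invalids count_invalids count_invalids_alt
  rw [PySem.List.foldl_if_eq_foldl_filter
    (fun number => (PySem.List.pyRange 1 (PySem.Int.floordiv (PySem.Str.len (PySem.Int.toStr number)) 2 + 1)).any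
      (aCheck number (PySem.Str.len (PySem.Int.toStr number))))
    (fun acc x => acc + x)]
  rw [PySem.List.foldl_add _ (fun x => x) 0]
  simp only [List.map_id', zero_add]
  apply List.Perm.sum_eq
  apply (List.perm_ext_iff_of_nodup
    ((pyRange_nodup start (end_+1)).filter _) (bSet_nodup start end_)).mpr
  intro y
  rw [List.mem_filter, bSet_mem, aPred_iff, PySem.List.mem_pyRange_one]
  constructor
  · rintro ⟨⟨h1, h2⟩, h3⟩
    exact ⟨h1, by omega, h3⟩
  · rintro ⟨h1, h2, h3⟩
    exact ⟨⟨h1, by omega⟩, h3⟩
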